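-- pv_equiv track=rewrite | github.com/emeznar/PythonPrograms | sum_all_elements_in_list_but_first_even_number.py | sum_of_initial_odds
-- ===== SOURCE A (Python) =====
-- def sum_of_initial_odds(nums):
--     # your code here
--     total = 0
--     for i in nums:
--         if i%2 != 0:
--             total = total + i
--         if i%2 == 0:
--             total = total + 0
--             return total
--     return total
-- ===== SOURCE B (Python) =====
-- from functools import reduce
--
-- def sum_of_initial_odds(nums):
--     # Right fold over the whole list: an even element resets the running
--     # suffix-result to 0, an odd element adds itself on top. After folding
--     # the entire list, the result is the sum of the leading odd prefix.
--     return reduce(lambda acc, x: 0 if x % 2 == 0 else x + acc, reversed(nums), 0)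
-- ===== Notes on version B (the rewrite author's own statement) =====
-- stated objective: alternative
-- what changed: Replaces A's left-to-right accumulator loop with early return by a right fold over the whole list in which an even element resets the accumulator to 0 and an odd element adds itself; no early exit, opposite traversal direction.
import Mathlib
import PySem

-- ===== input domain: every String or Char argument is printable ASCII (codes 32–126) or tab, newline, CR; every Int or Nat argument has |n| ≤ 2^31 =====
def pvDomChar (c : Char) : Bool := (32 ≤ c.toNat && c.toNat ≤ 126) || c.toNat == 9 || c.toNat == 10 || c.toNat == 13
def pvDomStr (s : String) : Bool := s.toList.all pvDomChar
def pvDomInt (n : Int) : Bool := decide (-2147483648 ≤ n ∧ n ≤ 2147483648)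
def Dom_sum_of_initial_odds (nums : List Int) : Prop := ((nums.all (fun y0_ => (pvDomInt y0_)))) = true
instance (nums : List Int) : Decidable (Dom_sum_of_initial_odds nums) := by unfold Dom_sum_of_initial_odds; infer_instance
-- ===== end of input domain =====

-- B replaces A's forward loop with early return by a right fold over the whole list
-- (even resets the accumulator to 0, odd adds itself): alternative algorithm, same cost.

-- ===== PORT A =====
-- literal transliteration of A's loop: accumulate total, return early on the first even
def sum_of_initial_odds_loop (nums : List Int) (total : Int) : Int :=
  match nums with
  | [] => total
  | i :: rest =>
    let total := if i % 2 ≠ 0 then total + i else total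
    if i % 2 == 0 then total + 0 else sum_of_initial_odds_loop rest total

def sum_of_initial_odds (nums : List Int) : Int :=
  sum_of_initial_odds_loop nums 0

-- ===== PORT B =====
-- reduce(lambda acc, x: 0 if x % 2 == 0 else x + acc, reversed(nums), 0)
def sum_of_initial_odds_alt (nums : List Int) : Int :=
  nums.reverse.foldl (fun acc x => if x % 2 == 0 then 0 else x + acc) 0

-- ===== PRECONDITION & SPEC =====
def Spec_sum_of_initial_odds (nums : List Int) (out : Int) : Prop := out = sum_of_initial_odds_alt nums
instance (nums : List Int) (out : Int) : Decidable (Spec_sum_of_initial_odds nums out) := by unfold Spec_sum_of_initial_odds; infer_instance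

-- ===== CLAIM =====
def Claim_equal_sum_of_initial_odds : Prop := ∀ (nums : List Int), Dom_sum_of_initial_odds nums → Spec_sum_of_initial_odds nums (sum_of_initial_odds nums)

-- ===== LEMMAS AND PROOFS =====
theorem sum_of_initial_odds_loop_eq (nums : List Int) (total : Int) :
    sum_of_initial_odds_loop nums total = total + (nums.takeWhile (fun x => x % 2 != 0)).sum := by
  induction nums generalizing total with
  | nil => simp [sum_of_initial_odds_loop]
  | cons i rest ih =>
    by_cases h : i % 2 = 0
    · simp [sum_of_initial_odds_loop, h]
    · simp [sum_of_initial_odds_loop, h, ih]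
      ring

theorem alt_eq_takeWhile_sum (nums : List Int) :
    sum_of_initial_odds_alt nums = (nums.takeWhile (fun x => x % 2 != 0)).sum := by
  unfold sum_of_initial_odds_alt
  rw [List.foldl_reverse]
  induction nums with
  | nil => simp
  | cons i rest ih =>
    rw [List.foldr_cons, List.takeWhile_cons]
    by_cases h : i % 2 = 0
    · simp only [h]; simp
    · simp only [beq_iff_eq, bne_iff_ne, ne_eq, h, if_false, ite_not, List.sum_cons]
      congr 1
      simpa using ih

-- ===== VERDICT =====
theorem sum_of_initial_odds_spec : Claim_equal_sum_of_initial_odds := by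
  intro nums _
  unfold Spec_sum_of_initial_odds sum_of_initial_odds
  rw [alt_eq_takeWhile_sum, sum_of_initial_odds_loop_eq]
  ring
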